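-- pv_equiv track=rewrite | github.com/Fondamenti18/fondamenti-di-programmazione | students/1753149/homework04/program01.py | dizionario
-- ===== SOURCE A (Python) =====
-- def dizionario(diz,f,a,radice,cont):
--     lista=[]
--     if radice==[]:
--         return
--     else:
--         for i in radice:
--             figlio=f[i]
--             diz[i]=cont
--             if len(figlio)==a:
--                 cont+=1
--             lista=figlio
--             dizionario(diz,f,a,lista,cont)
--
--     return dict(sorted(diz.items()))
-- ===== SOURCE B (Python) =====
-- def dizionario(diz, f, a, radice, cont):
--     # Iterative DFS over an explicit stack that only EMITS (node, value) assignment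
--     # pairs; the dict is built once at the end from diz plus the emitted pairs.
--     # (A mutates diz in place; the equivalence is about the return value only.)
--     if radice == []:
--         return
--     pairs = []
--     stack = [(list(radice), cont)]
--     while stack:
--         nodes, c = stack.pop()
--         if not nodes:
--             continue
--         i, rest = nodes[0], nodes[1:]
--         figlio = f[i]
--         pairs.append((i, c))
--         if len(figlio) == a:
--             c += 1
--         # LIFO: push siblings first, child last, so the child is processed first
--         stack.append((rest, c))
--         stack.append((list(figlio), c))
--     d = dict(diz)
--     for k, v in pairs:
--         d[k] = v
--     return dict(sorted(d.items()))
-- ===== Notes on version B (the rewrite author's own statement) =====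
-- stated objective: alternative
-- what changed: A's recursive DFS that mutates diz as it goes is replaced by an iterative stack-driven DFS that only emits a flat list of (node, value) assignment pairs, with the dict built once at the end by folding those pairs over diz; Pre_ excludes exactly the inputs where A raises KeyError (a reachable node missing from f) or RecursionError (a reachable cycle).
import Mathlib
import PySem

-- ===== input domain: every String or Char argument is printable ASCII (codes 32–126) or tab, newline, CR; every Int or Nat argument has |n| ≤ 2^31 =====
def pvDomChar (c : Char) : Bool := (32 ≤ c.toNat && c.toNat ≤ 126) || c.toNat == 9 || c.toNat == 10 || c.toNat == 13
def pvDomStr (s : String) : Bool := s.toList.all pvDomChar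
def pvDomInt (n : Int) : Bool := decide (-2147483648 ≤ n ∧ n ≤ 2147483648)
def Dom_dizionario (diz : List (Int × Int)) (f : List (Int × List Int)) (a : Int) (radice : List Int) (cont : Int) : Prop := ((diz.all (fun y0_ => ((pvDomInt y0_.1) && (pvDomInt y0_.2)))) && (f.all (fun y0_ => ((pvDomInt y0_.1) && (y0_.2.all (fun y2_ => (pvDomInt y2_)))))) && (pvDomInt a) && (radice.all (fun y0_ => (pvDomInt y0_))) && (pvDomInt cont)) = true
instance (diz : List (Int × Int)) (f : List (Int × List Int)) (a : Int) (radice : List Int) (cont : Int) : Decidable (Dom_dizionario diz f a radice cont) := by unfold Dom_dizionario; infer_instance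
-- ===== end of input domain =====

-- B replaces A's dict-mutating recursion by an iterative DFS over an explicit stack that
-- only EMITS (node, value) assignment pairs; the dict is built once at the end (A mutates
-- its `diz` argument in place; the equivalence proved here is about the RETURN value only).

-- ===== PORT A =====
-- the recursive body of A: thread the dict through the loop over `radice`, recursing into
-- each child list; `fuel` bounds the recursion DEPTH (a Lean totality artifact only —
-- Pre_ guarantees the depth bound f.length + 2 is never hit)
def dizLoop (f : PySem.Dict Int (List Int)) (a : Int) : Nat → PySem.Dict Int Int → List Int → Int → PySem.Dict Int Int
  | _, d, [], _ => d
  | 0, d, _ :: _, _ => d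
  | fuel + 1, d, i :: rest, c =>
    match f.get? i with
    | none => d          -- KeyError in Python: excluded by Pre_
    | some figlio =>
      let c1 := if (figlio.length : Int) = a then c + 1 else c
      dizLoop f a (fuel + 1) (dizLoop f a fuel (d.insert i c) figlio c1) rest c1
  termination_by fuel _ nodes _ => (fuel, nodes.length)

def dizionario (diz : List (Int × Int)) (f : List (Int × List Int)) (a : Int) (radice : List Int) (cont : Int) : Option (List (Int × Int)) :=
  if radice = [] then none
  else
    let d := dizLoop (PySem.Dict.ofList f) a (f.length + 2) (PySem.Dict.ofList diz) radice cont
    some (PySem.List.sorted2 d.items Prod.fst Prod.snd)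

-- ===== PORT B =====
-- one step per iteration of Source B's `while stack`: pop the top frame (nodes, c), emit the
-- assignment pair for its head node, push the sibling and child frames; `acc` is Source B's
-- `pairs` list; `fuel` bounds the number of iterations (totality artifact only — Pre_
-- guarantees pvFuelB iterations suffice)
def emitStack (f : PySem.Dict Int (List Int)) (a : Int) : Nat → List (Int × Int) → List (List Int × Int) → List (Int × Int)
  | _, acc, [] => acc
  | 0, acc, _ :: _ => acc
  | fuel + 1, acc, ([], _) :: stack => emitStack f a fuel acc stack
  | fuel + 1, acc, (i :: rest, c) :: stack =>
    match f.get? i with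
    | none => acc        -- KeyError in Python: excluded by Pre_
    | some figlio =>
      let c1 := if (figlio.length : Int) = a then c + 1 else c
      emitStack f a fuel (acc ++ [(i, c)]) ((figlio, c1) :: (rest, c1) :: stack)

-- fuel bound for emitStack: (largest child list + 2) ^ (f.length + 2) iterations per root
def pvKbound (f : List (Int × List Int)) : Nat :=
  (((PySem.Dict.ofList f).values).map List.length).foldr max 0

def pvFuelB (f : List (Int × List Int)) (radice : List Int) : Nat :=
  (pvKbound f + 2) ^ (f.length + 2) * (radice.length + 1)

def dizionario_alt (diz : List (Int × Int)) (f : List (Int × List Int)) (a : Int) (radice : List Int) (cont : Int) : Option (List (Int × Int)) :=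
  if radice = [] then none
  else
    let pairs := emitStack (PySem.Dict.ofList f) a (pvFuelB f radice) [] [(radice, cont)]
    let d := pairs.foldl (fun d kv => d.insert kv.1 kv.2) (PySem.Dict.ofList diz)
    some (PySem.List.sorted2 d.items Prod.fst Prod.snd)

-- ===== PRECONDITION & SPEC =====
-- pvReach f n S = the nodes reachable from S in exactly n child-steps (missing keys have no children)
def pvReach (f : PySem.Dict Int (List Int)) : Nat → List Int → List Int
  | 0, S => S
  | n + 1, S => pvReach f n (S.flatMap (fun i => (f.get? i).getD []))

-- Pre_: every node reachable from radice is a key of f, and no directed path of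
-- f.length + 2 child-steps starts in radice (i.e. the reachable part of f is acyclic).
-- These are exactly the inputs on which Python A returns: elsewhere it raises KeyError
-- or recurses forever (RecursionError).
def Pre_dizionario (diz : List (Int × Int)) (f : List (Int × List Int)) (a : Int) (radice : List Int) (cont : Int) : Prop :=
  (∀ n ∈ List.range (f.length + 3), ∀ j ∈ pvReach (PySem.Dict.ofList f) n radice,
      ((PySem.Dict.ofList f).get? j).isSome = true) ∧
  pvReach (PySem.Dict.ofList f) (f.length + 2) radice = []

instance (diz : List (Int × Int)) (f : List (Int × List Int)) (a : Int) (radice : List Int) (cont : Int) : Decidable (Pre_dizionario diz f a radice cont) := by unfold Pre_dizionario; infer_instance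

def pvWitness_dizionario : (List (Int × Int)) × (List (Int × List Int)) × Int × List Int × Int :=
  ([(5, 7)], [(1, [2, 3]), (2, []), (3, [])], 2, [1], 0)

def Spec_dizionario (diz : List (Int × Int)) (f : List (Int × List Int)) (a : Int) (radice : List Int) (cont : Int) (out : Option (List (Int × Int))) : Prop := out = dizionario_alt diz f a radice cont
instance (diz : List (Int × Int)) (f : List (Int × List Int)) (a : Int) (radice : List Int) (cont : Int) (out : Option (List (Int × Int))) : Decidable (Spec_dizionario diz f a radice cont out) := by unfold Spec_dizionario; infer_instance

-- ===== CLAIM (what is proved, stated in full; the proofs are below) =====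
def Claim_equal_dizionario : Prop := ∀ (diz : List (Int × Int)) (f : List (Int × List Int)) (a : Int) (radice : List Int) (cont : Int), Dom_dizionario diz f a radice cont → Pre_dizionario diz f a radice cont → Spec_dizionario diz f a radice cont (dizionario diz f a radice cont)

-- ===== LEMMAS AND PROOFS =====

-- okRun f fuel nodes = "A's recursion from nodes completes within depth fuel, no missing key"
def okRun (f : PySem.Dict Int (List Int)) : Nat → List Int → Bool
  | _, [] => true
  | 0, _ :: _ => false
  | fuel + 1, i :: rest =>
    match f.get? i with
    | none => false
    | some figlio => okRun f fuel figlio && okRun f (fuel + 1) rest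
  termination_by fuel nodes => (fuel, nodes.length)

-- costRun f fuel nodes = number of emitStack iterations to consume a frame holding nodes
def costRun (f : PySem.Dict Int (List Int)) : Nat → List Int → Nat
  | _, [] => 1
  | 0, _ :: _ => 0
  | fuel + 1, i :: rest =>
    match f.get? i with
    | none => 0
    | some figlio => 1 + costRun f fuel figlio + costRun f (fuel + 1) rest
  termination_by fuel nodes => (fuel, nodes.length)

-- emitRun f a fuel nodes c = the assignment pairs A's recursion from (nodes, c) performs, in order
def emitRun (f : PySem.Dict Int (List Int)) (a : Int) : Nat → List Int → Int → List (Int × Int)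
  | _, [], _ => []
  | 0, _ :: _, _ => []
  | fuel + 1, i :: rest, c =>
    match f.get? i with
    | none => []
    | some figlio =>
      let c1 := if (figlio.length : Int) = a then c + 1 else c
      (i, c) :: (emitRun f a fuel figlio c1 ++ emitRun f a (fuel + 1) rest c1)
  termination_by fuel nodes _ => (fuel, nodes.length)

theorem pvReach_mono (f : PySem.Dict Int (List Int)) :
    ∀ (n : Nat) (S T : List Int), (∀ x, x ∈ S → x ∈ T) →
      ∀ j, j ∈ pvReach f n S → j ∈ pvReach f n T := by
  intro n
  induction n with
  | zero => intro S T h j hj; exact h j hj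
  | succ n ih =>
    intro S T h j hj
    simp only [pvReach] at hj ⊢
    refine ih _ _ ?_ j hj
    intro x hx
    simp only [List.mem_flatMap] at hx ⊢
    obtain ⟨i, hi, hxi⟩ := hx
    exact ⟨i, h i hi, hxi⟩

theorem pvReach_succ_out (f : PySem.Dict Int (List Int)) :
    ∀ (n : Nat) (S : List Int),
      pvReach f (n + 1) S = (pvReach f n S).flatMap (fun i => (f.get? i).getD []) := by
  intro n
  induction n with
  | zero => intro S; simp [pvReach]
  | succ n ih =>
    intro S
    show pvReach f (n + 1) (S.flatMap _) = _
    rw [ih]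
    rfl

theorem pvReach_nil_of_nil (f : PySem.Dict Int (List Int)) (F : Nat) (S : List Int)
    (h : pvReach f F S = []) : ∀ n, F ≤ n → pvReach f n S = [] := by
  intro n hn
  obtain ⟨k, rfl⟩ := Nat.exists_eq_add_of_le hn
  induction k with
  | zero => exact h
  | succ k ih =>
    have he : F + (k + 1) = (F + k) + 1 := by omega
    rw [he, pvReach_succ_out, ih (Nat.le_add_right _ _)]
    rfl

theorem okRun_of_reach (f : PySem.Dict Int (List Int)) :
    ∀ (fuel : Nat) (nodes : List Int),
      (∀ n j, j ∈ pvReach f n nodes → ((f.get? j).isSome = true)) →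
      pvReach f fuel nodes = [] → okRun f fuel nodes = true := by
  intro fuel nodes
  induction fuel, nodes using okRun.induct f with
  | case1 fuel => intro _ _; simp [okRun]
  | case2 i rest =>
    intro _ he
    exact absurd he (by simp [pvReach])
  | case3 fuel i rest hnone =>
    intro hc _
    have := hc 0 i (by simp [pvReach])
    rw [hnone] at this
    simp at this
  | case4 fuel i rest figlio hsome ihch ihrest =>
    intro hc he
    have hsub : ∀ x, x ∈ figlio → x ∈ (i :: rest).flatMap (fun i => (f.get? i).getD []) := by
      intro x hx
      simp only [List.mem_flatMap]
      exact ⟨i, by simp, by rw [hsome]; simpa using hx⟩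
    have hsubr : ∀ x, x ∈ rest → x ∈ (i :: rest) := by intro x hx; simp [hx]
    have hch : okRun f fuel figlio = true := by
      apply ihch
      · intro n j hj
        exact hc (n + 1) j (pvReach_mono f n _ _ hsub j hj)
      · have : ∀ j, j ∈ pvReach f fuel figlio → False := by
          intro j hj
          have := pvReach_mono f fuel _ _ hsub j hj
          rw [show pvReach f fuel ((i :: rest).flatMap fun i => (f.get? i).getD []) = pvReach f (fuel+1) (i :: rest) from rfl, he] at this
          simp at this
        exact List.eq_nil_iff_forall_not_mem.mpr this
    have hrest : okRun f (fuel + 1) rest = true := by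
      apply ihrest
      · intro n j hj
        exact hc n j (pvReach_mono f n _ _ hsubr j hj)
      · have : ∀ j, j ∈ pvReach f (fuel + 1) rest → False := by
          intro j hj
          have := pvReach_mono f (fuel + 1) _ _ hsubr j hj
          rw [he] at this
          simp at this
        exact List.eq_nil_iff_forall_not_mem.mpr this
    simp [okRun, hsome, hch, hrest]

theorem le_foldr_max_of_mem (l : List Nat) (x : Nat) (h : x ∈ l) : x ≤ l.foldr max 0 := by
  induction l with
  | nil => cases h
  | cons y t ih =>
    rcases List.mem_cons.mp h with rfl | h
    · exact le_max_left _ _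
    · exact le_trans (ih h) (le_max_right _ _)

theorem pvKbound_spec (f : List (Int × List Int)) (i : Int) (v : List Int)
    (h : (PySem.Dict.ofList f).get? i = some v) : v.length ≤ pvKbound f := by
  have hm := PySem.Dict.mem_items_of_get?_eq_some _ h
  have hv : v ∈ (PySem.Dict.ofList f).values := by
    simp only [PySem.Dict.values]
    exact List.mem_map.mpr ⟨(i, v), hm, rfl⟩
  exact le_foldr_max_of_mem _ _ (List.mem_map.mpr ⟨v, hv, rfl⟩)

theorem costRun_le (f : PySem.Dict Int (List Int)) (K : Nat)
    (hK : ∀ i v, f.get? i = some v → v.length ≤ K) :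
    ∀ (fuel : Nat) (nodes : List Int), okRun f fuel nodes = true →
      costRun f fuel nodes ≤ (K + 2) ^ fuel * (nodes.length + 1) := by
  intro fuel nodes
  induction fuel, nodes using okRun.induct f with
  | case1 fuel =>
    intro _
    have : 1 ≤ (K + 2) ^ fuel := Nat.one_le_pow _ _ (by omega)
    simp [costRun]
    nlinarith
  | case2 i rest => intro h; simp [okRun] at h
  | case3 fuel i rest hnone => intro h; simp [okRun, hnone] at h
  | case4 fuel i rest figlio hsome ihch ihrest =>
    intro h
    simp only [okRun, hsome, Bool.and_eq_true] at h
    have h1 := ihch h.1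
    have h2 := ihrest h.2
    have hlen : figlio.length ≤ K := hK i figlio hsome
    simp only [costRun, hsome, List.length_cons]
    have hp : 1 ≤ (K + 2) ^ fuel := Nat.one_le_pow _ _ (by omega)
    have h1' : costRun f fuel figlio ≤ (K + 2) ^ fuel * (K + 1) :=
      le_trans h1 (Nat.mul_le_mul_left _ (by omega))
    have e1 : (K + 2) ^ (fuel + 1) = (K + 2) ^ fuel * (K + 1) + (K + 2) ^ fuel := by
      rw [pow_succ]; ring
    have e2 : (K + 2) ^ (fuel + 1) * (rest.length + 1 + 1)
        = (K + 2) ^ (fuel + 1) * (rest.length + 1) + (K + 2) ^ (fuel + 1) := by ring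
    simp only [Nat.succ_eq_add_one]
    omega

-- A's dict result = the emitted assignment pairs folded into the starting dict
theorem dizLoop_eq_foldl_emitRun (f : PySem.Dict Int (List Int)) (a : Int) :
    ∀ (fuel : Nat) (nodes : List Int) (c : Int) (d : PySem.Dict Int Int),
      dizLoop f a fuel d nodes c
        = (emitRun f a fuel nodes c).foldl (fun d kv => d.insert kv.1 kv.2) d := by
  intro fuel nodes
  induction fuel, nodes using okRun.induct f with
  | case1 fuel => intro c d; simp [dizLoop, emitRun]
  | case2 i rest => intro c d; simp [dizLoop, emitRun]
  | case3 fuel i rest hnone => intro c d; simp [dizLoop, emitRun, hnone]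
  | case4 fuel i rest figlio hsome ihch ihrest =>
    intro c d
    simp only [dizLoop, emitRun, hsome, List.foldl_cons, List.foldl_append]
    rw [ihch, ihrest]

-- the simulation: one stack frame (nodes, c) on top is consumed in exactly costRun steps
-- and appends to the pairs accumulator exactly what A's recursion would assign
theorem emitStack_sim (f : PySem.Dict Int (List Int)) (a : Int) :
    ∀ (fuel : Nat) (nodes : List Int), okRun f fuel nodes = true →
      ∀ (c : Int) (acc : List (Int × Int)) (R : List (List Int × Int)) (m : Nat),
        costRun f fuel nodes ≤ m →
        emitStack f a m acc ((nodes, c) :: R)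
          = emitStack f a (m - costRun f fuel nodes) (acc ++ emitRun f a fuel nodes c) R := by
  intro fuel nodes
  induction fuel, nodes using okRun.induct f with
  | case1 fuel =>
    intro _ c acc R m hm
    simp only [costRun] at hm ⊢
    obtain ⟨m', rfl⟩ : ∃ m', m = m' + 1 := ⟨m - 1, by omega⟩
    simp [emitStack, emitRun]
  | case2 i rest => intro h; simp [okRun] at h
  | case3 fuel i rest hnone => intro h; simp [okRun, hnone] at h
  | case4 fuel i rest figlio hsome ihch ihrest =>
    intro h c acc R m hm
    simp only [okRun, hsome, Bool.and_eq_true] at h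
    simp only [costRun, hsome] at hm ⊢
    obtain ⟨m', rfl⟩ : ∃ m', m = m' + 1 := ⟨m - 1, by omega⟩
    have hc1 : costRun f fuel figlio ≤ m' := by omega
    have hc2 : costRun f (fuel + 1) rest ≤ m' - costRun f fuel figlio := by omega
    simp only [emitStack, hsome]
    rw [ihch h.1 _ _ _ _ hc1]
    rw [ihrest h.2 _ _ _ _ hc2]
    have harith : m' - costRun f fuel figlio - costRun f (fuel + 1) rest
        = m' + 1 - (1 + costRun f fuel figlio + costRun f (fuel + 1) rest) := by omega
    rw [harith]
    simp only [emitRun, hsome, List.append_assoc, List.cons_append, List.nil_append]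

-- ===== VERDICT (by name: the statement is the Claim_ definition above) =====
theorem dizionario_spec : Claim_equal_dizionario := by
  intro diz f a radice cont _ hpre
  unfold Spec_dizionario dizionario dizionario_alt
  by_cases hr : radice = []
  · simp [hr]
  · simp only [hr, if_false]
    obtain ⟨hc, he⟩ := hpre
    set fd := PySem.Dict.ofList f with hfd
    have hcu : ∀ n j, j ∈ pvReach fd n radice → ((fd.get? j).isSome = true) := by
      intro n j hj
      by_cases hn : n ≤ f.length + 2
      · exact hc n (List.mem_range.mpr (by omega)) j hj
      · rw [pvReach_nil_of_nil fd (f.length + 2) radice he n (by omega)] at hj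
        cases hj
    have hok : okRun fd (f.length + 2) radice = true := okRun_of_reach fd _ _ hcu he
    have hcost : costRun fd (f.length + 2) radice ≤ pvFuelB f radice := by
      unfold pvFuelB
      exact costRun_le fd (pvKbound f) (fun i v h => pvKbound_spec f i v h) _ _ hok
    have hsim := emitStack_sim fd a (f.length + 2) radice hok cont [] [] (pvFuelB f radice) hcost
    rw [hsim]
    simp only [List.nil_append, emitStack]
    rw [dizLoop_eq_foldl_emitRun]
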